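-- pv_equiv track=rewrite | github.com/thierryxdp/TCC | problems/831/solution_326799.py | lingua_p
-- ===== SOURCE A (Python) =====
-- def lingua_p(palavra):
--
--     vogal = 'aeiouAEIOU'
--     contador = 0
--
--     for i in range(len(palavra)):
--         indice = i + contador
--         if palavra[indice] in vogal:
--             palavra = palavra[:indice+1] + 'p' + palavra[indice:]
--             contador += 2
--
--     return palavra
-- ===== SOURCE B (Python) =====
-- def lingua_p(palavra):
--     for v in 'aeiouAEIOU':
--         palavra = palavra.replace(v, v + 'p' + v)
--     return palavra
-- ===== Notes on version B (the rewrite author's own statement) =====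
-- stated objective: faster
-- what changed: B drops A's indexed scan with an insertion-offset counter and slice-based splicing, looping instead over the ten vowels and rewriting the whole string once per vowel with str.replace, which avoids a quadratic number of string copies.
import Mathlib
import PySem

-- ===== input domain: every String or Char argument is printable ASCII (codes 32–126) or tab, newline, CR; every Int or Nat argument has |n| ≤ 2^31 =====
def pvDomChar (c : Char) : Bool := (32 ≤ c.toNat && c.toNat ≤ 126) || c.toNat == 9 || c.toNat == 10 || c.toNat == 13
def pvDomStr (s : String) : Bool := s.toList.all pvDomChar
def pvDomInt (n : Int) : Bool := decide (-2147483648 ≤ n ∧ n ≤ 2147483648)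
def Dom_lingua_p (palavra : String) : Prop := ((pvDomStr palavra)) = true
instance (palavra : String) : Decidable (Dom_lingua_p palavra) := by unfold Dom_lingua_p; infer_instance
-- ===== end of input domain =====

-- B replaces A's indexed scan with an insertion-offset counter and slice splicing
-- by an idiomatic loop over the ten vowels doing palavra.replace(v, v+'p'+v); same return value.


-- ===== PORT A =====
-- A's loop body as a step function: i is the range index, state = (current string chars, contador).
def lingua_pStep (st : List Char × Int) (i : Int) : List Char × Int :=
  let indice := i + st.2
  match PySem.List.pyGet? st.1 indice with
  | some c =>
    if PySem.Chars.isIn [c] ("aeiouAEIOU".toList) then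
      (PySem.List.slice st.1 none (some (indice + 1)) ++ 'p' :: PySem.List.slice st.1 (some indice) none,
       st.2 + 2)
    else st
  | none => st  -- Python would raise IndexError here; unreachable: indice is always in range

def lingua_p (palavra : String) : String :=
  String.ofList
    ((PySem.List.pyRange 0 (PySem.Str.len palavra) 1).foldl lingua_pStep (palavra.toList, 0)).1

-- ===== PORT B =====
def lingua_p_alt (palavra : String) : String :=
  "aeiouAEIOU".toList.foldl
    (fun p v => PySem.Str.replace p (String.ofList [v]) (String.ofList [v, 'p', v])) palavra

-- ===== PRECONDITION & SPEC =====
def Spec_lingua_p (palavra : String) (out : String) : Prop := out = lingua_p_alt palavra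
instance (palavra : String) (out : String) : Decidable (Spec_lingua_p palavra out) := by unfold Spec_lingua_p; infer_instance

-- ===== CLAIM (what is proved, stated in full; the proofs are below) =====
def Claim_equal_lingua_p : Prop := ∀ (palavra : String), Dom_lingua_p palavra → Spec_lingua_p palavra (lingua_p palavra)

-- ===== LEMMAS AND PROOFS =====

-- the per-character effect of one replace pass (vowel v)
def repF (v c : Char) : List Char := if c = v then [v, 'p', v] else [c]
-- the per-character effect of the whole vowel loop, given the vowels vs
def vF (vs : List Char) (c : Char) : List Char := if c ∈ vs then [c, 'p', c] else [c]
-- composite per-character effect of replace passes for the vowels vs, in order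
def gF : List Char → Char → List Char
  | [], c => [c]
  | v :: vs, c => (repF v c).flatMap (gF vs)

theorem isIn_singleton (c : Char) (vs : List Char) :
    PySem.Chars.isIn [c] vs = vs.contains c := by
  rw [Bool.eq_iff_iff, PySem.Chars.isIn_iff_infix, List.contains_iff_mem]
  constructor
  · intro h; exact h.subset (by simp)
  · intro h
    obtain ⟨l1, l2, rfl⟩ := List.append_of_mem h
    exact ⟨l1, l2, by simp⟩

theorem replace_go_single (v : Char) (new : List Char) :
    ∀ (fuel : Nat) (s acc : List Char), s.length ≤ fuel →
      PySem.Chars.replace.go [v] new fuel s acc =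
        acc.reverse ++ s.flatMap (fun c => if c = v then new else [c]) := by
  intro fuel
  induction fuel with
  | zero =>
    intro s acc h
    have : s = [] := List.eq_nil_of_length_eq_zero (Nat.le_zero.mp h)
    subst this
    rw [PySem.Chars.replace.go.eq_def]; simp
  | succ n ih =>
    intro s acc h
    cases s with
    | nil => rw [PySem.Chars.replace.go.eq_def]; simp
    | cons c t =>
      rw [PySem.Chars.replace.go.eq_def]
      simp only [List.isPrefixOf, List.flatMap_cons]
      by_cases hc : c = v
      · subst hc
        simp only [beq_self_eq_true, Bool.true_and, if_true,
          List.length_singleton, List.drop_one, List.tail_cons]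
        rw [ih t (new.reverse ++ acc) (by simpa using Nat.le_of_succ_le_succ h)]
        simp
      · have : (([v] : List Char).isPrefixOf (c :: t)) = false := by
          simp [List.isPrefixOf]; exact fun hv => absurd hv.symm hc
        simp only [show (v == c && true) = false from by simp [(Ne.symm hc : v ≠ c)],
          Bool.false_eq_true, if_false]
        rw [ih t (c :: acc) (by simpa using Nat.le_of_succ_le_succ h)]
        simp [hc]

theorem replace_single (v : Char) (new s : List Char) :
    PySem.Chars.replace s [v] new = s.flatMap (fun c => if c = v then new else [c]) := by
  unfold PySem.Chars.replace
  rw [replace_go_single v new s.length s [] (le_refl _)]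
  simp

-- the B-side fold at the character-list level
theorem chars_fold (vs : List Char) :
    ∀ p : List Char,
      vs.foldl (fun s v => PySem.Chars.replace s [v] [v, 'p', v]) p = p.flatMap (gF vs) := by
  induction vs with
  | nil => intro p; simp [gF]
  | cons v vs ih =>
    intro p
    simp only [List.foldl_cons]
    rw [replace_single v [v, 'p', v] p, ih, List.flatMap_assoc]
    rfl

theorem str_fold (vs : List Char) :
    ∀ s : String,
      vs.foldl (fun p v => PySem.Str.replace p (String.ofList [v]) (String.ofList [v, 'p', v])) s =
        String.ofList (vs.foldl (fun p v => PySem.Chars.replace p [v] [v, 'p', v]) s.toList) := by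
  induction vs with
  | nil => intro s; simp [String.ofList_toList]
  | cons v vs ih =>
    intro s
    simp only [List.foldl_cons]
    rw [ih]
    congr 1
    simp [PySem.Str.toList_replace]

theorem gF_not_mem (vs : List Char) (c : Char) (h : c ∉ vs) : gF vs c = [c] := by
  induction vs with
  | nil => rfl
  | cons v vs ih =>
    simp only [List.mem_cons, not_or] at h
    simp [gF, repF, h.1, ih h.2]

theorem gF_eq_vF (vs : List Char) (hnd : vs.Nodup) (hp : 'p' ∉ vs) (c : Char) :
    gF vs c = vF vs c := by
  induction vs with
  | nil => rfl
  | cons v vs ih =>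
    simp only [List.nodup_cons] at hnd
    simp only [List.mem_cons, not_or] at hp
    by_cases hc : c = v
    · subst hc
      simp [gF, repF, vF, gF_not_mem vs c hnd.1, gF_not_mem vs 'p' hp.2]
    · simp [gF, repF, hc, ih hnd.2 hp.2, vF]

def isVow (c : Char) : Bool := c ∈ "aeiouAEIOU".toList

theorem vF_len (done : List Char) :
    (done.flatMap (vF "aeiouAEIOU".toList)).length = done.length + 2 * done.countP isVow := by
  induction done with
  | nil => rfl
  | cons c t ih =>
    rw [List.flatMap_cons, List.length_append, ih, List.countP_cons]
    by_cases h : c ∈ "aeiouAEIOU".toList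
    · have hb : isVow c = true := by simpa [isVow] using h
      simp only [vF, if_pos h, hb, if_true, List.length_cons, List.length_nil]
      omega
    · have hb : isVow c = false := by simpa [isVow] using h
      simp only [vF, if_neg h, hb, Bool.false_eq_true, if_false, List.length_cons, List.length_nil]
      omega

theorem lingua_pA_inv :
    ∀ (rest done : List Char),
      ((List.range' done.length rest.length).map (fun k : Nat => (k : Int))).foldl lingua_pStep
          (done.flatMap (vF "aeiouAEIOU".toList) ++ rest, 2 * (done.countP isVow : Int)) =
        ((done ++ rest).flatMap (vF "aeiouAEIOU".toList), 2 * ((done ++ rest).countP isVow : Int)) := by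
  intro rest
  induction rest with
  | nil => intro done; simp
  | cons r rest' ih =>
    intro done
    rw [List.length_cons, List.range'_succ, List.map_cons, List.foldl_cons]
    have hidx : (done.length : Int) + 2 * (done.countP isVow : Int) =
        ((done.flatMap (vF "aeiouAEIOU".toList)).length : Int) := by
      rw [vF_len]; push_cast; ring
    have hstep :
        lingua_pStep (done.flatMap (vF "aeiouAEIOU".toList) ++ r :: rest',
            2 * (done.countP isVow : Int)) (done.length : Int) =
          ((done ++ [r]).flatMap (vF "aeiouAEIOU".toList) ++ rest',
            2 * ((done ++ [r]).countP isVow : Int)) := by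
      unfold lingua_pStep
      simp only [hidx, PySem.List.pyGet?_append_length]
      rw [isIn_singleton]
      by_cases hr : r ∈ "aeiouAEIOU".toList
      · rw [show "aeiouAEIOU".toList.contains r = true by simpa using hr]
        have h1 : ((done.flatMap (vF "aeiouAEIOU".toList)).length : Int) + 1 =
            (((done.flatMap (vF "aeiouAEIOU".toList)).length + 1 : Nat) : Int) := by push_cast; ring
        rw [if_pos rfl, h1, PySem.List.slice_to_natCast, PySem.List.slice_from_natCast,
          List.drop_left]
        have htake : List.take ((done.flatMap (vF "aeiouAEIOU".toList)).length + 1)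
            (done.flatMap (vF "aeiouAEIOU".toList) ++ r :: rest') =
            done.flatMap (vF "aeiouAEIOU".toList) ++ [r] := by
          rw [List.take_append]; simp
        rw [htake]
        have hvf : vF "aeiouAEIOU".toList r = [r, 'p', r] := by
          simp only [vF, if_pos hr]
        have hcnt : (done ++ [r]).countP isVow = done.countP isVow + 1 := by
          rw [List.countP_append]
          have : isVow r = true := by simpa [isVow] using hr
          simp [this]
        rw [List.flatMap_append, List.flatMap_cons, List.flatMap_nil, hvf, hcnt]
        simp only [Prod.mk.injEq]
        constructor
        · simp
        · push_cast; ring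
      · rw [show "aeiouAEIOU".toList.contains r = false by simpa using hr]
        rw [if_neg (by simp)]
        have hvf : vF "aeiouAEIOU".toList r = [r] := by
          simp only [vF, if_neg hr]
        have hcnt : (done ++ [r]).countP isVow = done.countP isVow := by
          rw [List.countP_append]
          have : isVow r = false := by simpa [isVow] using hr
          simp [this]
        rw [List.flatMap_append, List.flatMap_cons, List.flatMap_nil, hvf, hcnt]
        simp
    rw [hstep]
    have harr : done.length + 1 = (done ++ [r]).length := by simp
    rw [harr, ih (done ++ [r])]
    simp

theorem lingua_p_eq (palavra : String) :
    lingua_p palavra = String.ofList (palavra.toList.flatMap (vF "aeiouAEIOU".toList)) := by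
  unfold lingua_p
  rw [PySem.Str.len_eq, PySem.List.pyRange_zero_natCast, List.range_eq_range']
  have := lingua_pA_inv palavra.toList []
  simp only [List.length_nil, List.flatMap_nil, List.nil_append, List.countP_nil,
    Nat.cast_zero, mul_zero] at this
  rw [this]

theorem lingua_p_alt_eq (palavra : String) :
    lingua_p_alt palavra = String.ofList (palavra.toList.flatMap (vF "aeiouAEIOU".toList)) := by
  unfold lingua_p_alt
  rw [str_fold, chars_fold]
  congr 1
  congr 1
  funext c
  exact gF_eq_vF _ (by decide) (by decide) c

-- ===== VERDICT (by name: the statement is the Claim_ definition above) =====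
theorem lingua_p_spec : Claim_equal_lingua_p := by
  intro palavra _
  unfold Spec_lingua_p
  rw [lingua_p_eq, lingua_p_alt_eq]
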